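-- pv_equiv track=rewrite | github.com/armelivan/fact-check-backend | src/dataHandling/keywordsToPotentialQuerries.py | generateSubSentences
-- ===== SOURCE A (Python) =====
-- def generateSubSentences(sentence):
--   potentialQuerriesList= []
--   n = len(sentence)
--   for i in range(0,n):
--       for j in range(i+1,n+1):
--           potentialQuerriesList.append(sentence[i:j])
--   potentialQuerriesList.sort(key=len) # optional but good for analysis
--   return multiplesWordsListToSentence(potentialQuerriesList)
--
-- def multiplesWordsListToSentence(multiplesWordsList):
--   mp =[]
--   for wordList in multiplesWordsList:
--     wordList = wordsListToSentence(wordList)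
--     mp.append(wordList)
--
--   return mp
--
-- def wordsListToSentence(wordList):
--   return " ".join(wordList)
-- ===== SOURCE B (Python) =====
-- def generateSubSentences(sentence):
--   # Generate subsentences directly in nondecreasing length order (length-major,
--   # start-index ascending), joining on the fly: no sort, no second pass.
--   result = []
--   n = len(sentence)
--   for L in range(1, n + 1):
--     for i in range(0, n - L + 1):
--       result.append(" ".join(sentence[i:i + L]))
--   return result
-- ===== Notes on version B (the rewrite author's own statement) =====
-- stated objective: alternative
-- what changed: Instead of generating all slices in start-index order, stably sorting them by length and then joining in a separate pass, B emits the joined subsentences directly in length-major/start-ascending order, which is exactly the stable length-sort order, so the sort call and the extra join pass disappear.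
import Mathlib
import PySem

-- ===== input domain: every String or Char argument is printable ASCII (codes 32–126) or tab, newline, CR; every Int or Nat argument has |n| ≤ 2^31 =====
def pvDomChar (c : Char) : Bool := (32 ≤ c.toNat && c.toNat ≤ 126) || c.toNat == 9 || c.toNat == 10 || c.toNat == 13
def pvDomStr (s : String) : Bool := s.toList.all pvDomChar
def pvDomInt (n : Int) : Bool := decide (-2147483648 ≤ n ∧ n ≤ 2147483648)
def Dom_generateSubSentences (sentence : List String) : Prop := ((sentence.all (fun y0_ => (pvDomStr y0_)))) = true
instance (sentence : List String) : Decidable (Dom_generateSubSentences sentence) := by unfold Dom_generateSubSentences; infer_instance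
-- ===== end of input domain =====

-- B emits the joined subsentences directly in length-major / start-ascending order (which is
-- exactly the stable length-sort order), so A's sort call and separate join pass disappear.

-- ===== PORT A =====
def wordsListToSentence (wordList : List String) : String :=
  PySem.Str.join " " wordList

def multiplesWordsListToSentence (multiplesWordsList : List (List String)) : List String :=
  multiplesWordsList.foldl (fun mp wordList => mp ++ [wordsListToSentence wordList]) []

def generateSubSentences (sentence : List String) : List String :=
  let n : Int := sentence.length
  let potentialQuerriesList : List (List String) :=
    (PySem.List.pyRange 0 n 1).foldl (fun acc i =>
      (PySem.List.pyRange (i + 1) (n + 1) 1).foldl (fun acc2 j =>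
        acc2 ++ [PySem.List.slice sentence (some i) (some j)]) acc) []
  multiplesWordsListToSentence
    (PySem.List.sorted potentialQuerriesList (fun l => l.length) false)

-- ===== PORT B =====
def generateSubSentences_alt (sentence : List String) : List String :=
  let n : Int := sentence.length
  (PySem.List.pyRange 1 (n + 1) 1).foldl (fun acc L =>
    (PySem.List.pyRange 0 (n - L + 1) 1).foldl (fun acc2 i =>
      acc2 ++ [PySem.Str.join " " (PySem.List.slice sentence (some i) (some (i + L)))]) acc) []

-- ===== PRECONDITION & SPEC =====
def Spec_generateSubSentences (sentence : List String) (out : List String) : Prop := out = generateSubSentences_alt sentence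
instance (sentence : List String) (out : List String) : Decidable (Spec_generateSubSentences sentence out) := by unfold Spec_generateSubSentences; infer_instance

-- ===== CLAIM (what is proved, stated in full; the proofs are below) =====
def Claim_equal_generateSubSentences : Prop := ∀ (sentence : List String), Dom_generateSubSentences sentence → Spec_generateSubSentences sentence (generateSubSentences sentence)

-- ===== LEMMAS AND PROOFS =====

-- the slice sentence[i:i+l], in drop/take form
def pvSl (xs : List String) (i l : Nat) : List String := (xs.drop i).take l

-- row i of A's generation order: the slices starting at i, lengths 1 .. n-i
def pvRow (xs : List String) (i : Nat) : List (List String) :=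
  (List.range (xs.length - i)).map (fun t => pvSl xs i (t + 1))

-- A's whole generation order: rows 0 .. i-1 (row-major)
def pvFlatRows (xs : List String) (i : Nat) : List (List String) :=
  (List.range i).flatMap (pvRow xs)

-- a column: the slices of length l+1 with start indices 0 .. c-1
def pvCol (xs : List String) (c l : Nat) : List (List String) :=
  (List.range c).map (fun i => pvSl xs i (l + 1))

-- state of the stable insertion sort after rows 0..i-1 plus the first t entries of row i
def pvQ (xs : List String) (i t : Nat) : List (List String) :=
  (List.range xs.length).flatMap
    (fun l => pvCol xs (min (if l + 1 ≤ t then i + 1 else i) (xs.length - l)) l)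

-- B's generation order (length-major, start ascending)
def pvSB (xs : List String) : List (List String) :=
  (List.range xs.length).flatMap (fun l => pvCol xs (xs.length - l) l)

lemma pvSl_length_le (xs : List String) (i l : Nat) : (pvSl xs i l).length ≤ l := by
  simp [pvSl]

lemma pvSl_length (xs : List String) (i l : Nat) (h : i + l ≤ xs.length) :
    (pvSl xs i l).length = l := by
  simp [pvSl]; omega

lemma pv_insertBy_middle {α : Type} (before : α → α → Bool) (x : α) (u v : List α)
    (hu : ∀ y ∈ u, before x y = false) (hv : ∀ y ∈ v, before x y = true) :
    PySem.List.insertBy before x (u ++ v) = u ++ x :: v := by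
  induction u with
  | nil =>
    cases v with
    | nil => rfl
    | cons y ys => simp [PySem.List.insertBy, hv y (by simp)]
  | cons a u ih =>
    have ha : before x a = false := hu a (by simp)
    simp [PySem.List.insertBy, ha]
    exact ih (fun y hy => hu y (by simp [hy]))

lemma pv_sorted_snoc {α κ : Type} [LT κ] [DecidableLT κ] (xs : List α) (x : α) (key : α → κ) :
    PySem.List.sorted (xs ++ [x]) key false =
      PySem.List.insertBy (fun a b => decide (key a < key b)) x (PySem.List.sorted xs key false) := by
  rw [PySem.List.sorted_eq_foldl_insertBy, PySem.List.sorted_eq_foldl_insertBy, List.foldl_append]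
  rfl

-- finishing row i gives the start state of row i+1
lemma pv_rows (xs : List String) (i : Nat) :
    pvQ xs i (xs.length - i) = pvQ xs (i + 1) 0 := by
  unfold pvQ
  apply List.flatMap_congr
  intro l _
  congr 1
  split_ifs <;> omega

-- inserting row i's entry of length t+1 lands at the end of column t
lemma pv_step (xs : List String) (i t : Nat) (ht : i + t + 1 ≤ xs.length) :
    PySem.List.insertBy (fun a b => decide (a.length < b.length)) (pvSl xs i (t + 1)) (pvQ xs i t)
      = pvQ xs i (t + 1) := by
  set n := xs.length with hn
  have hxlen : (pvSl xs i (t + 1)).length = t + 1 := pvSl_length xs i (t+1) (by omega)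
  have hsplit : List.range n = List.range (t+1) ++ (List.range (n - (t+1))).map (fun m => (t+1) + m) := by
    rw [← List.range_add]; congr 1; omega
  unfold pvQ
  rw [hsplit, List.flatMap_append, List.flatMap_append]
  rw [pv_insertBy_middle]
  · -- U ++ x :: V = U' ++ V'
    rw [List.flatMap_map, List.flatMap_map]
    have hV : (List.range (n - (t+1))).flatMap
        (fun a => pvCol xs (min (if (t+1) + a + 1 ≤ t + 1 then i + 1 else i) (xs.length - ((t+1) + a))) ((t+1) + a))
        = (List.range (n - (t+1))).flatMap
        (fun a => pvCol xs (min (if (t+1) + a + 1 ≤ t then i + 1 else i) (xs.length - ((t+1) + a))) ((t+1) + a)) := by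
      apply List.flatMap_congr
      intro m _
      congr 1
      split_ifs <;> omega
    have hU : (List.range (t+1)).flatMap
        (fun l => pvCol xs (min (if l + 1 ≤ t + 1 then i + 1 else i) (xs.length - l)) l)
        = (List.range (t+1)).flatMap
        (fun l => pvCol xs (min (if l + 1 ≤ t then i + 1 else i) (xs.length - l)) l) ++ [pvSl xs i (t+1)] := by
      rw [List.range_succ, List.flatMap_append, List.flatMap_append]
      simp only [List.flatMap_singleton]
      have h1 : min (if t + 1 ≤ t + 1 then i + 1 else i) (xs.length - t) = i + 1 := by
        split_ifs <;> omega
      have h2 : min (if t + 1 ≤ t then i + 1 else i) (xs.length - t) = i := by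
        split_ifs <;> omega
      rw [h1, h2]
      have h3 : pvCol xs (i+1) t = pvCol xs i t ++ [pvSl xs i (t+1)] := by
        unfold pvCol
        rw [List.range_succ, List.map_append]
        rfl
      rw [h3, ← List.append_assoc]
      congr 2
      apply List.flatMap_congr
      intro l hl
      have hl' : l < t := List.mem_range.mp hl
      congr 1
      split_ifs <;> omega
    rw [hV, hU, List.append_assoc]
    rfl
  · -- hu : elements of columns 0..t have length ≤ t+1
    intro y hy
    simp only [List.mem_flatMap, List.mem_range] at hy
    obtain ⟨l, hl, hyc⟩ := hy
    unfold pvCol at hyc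
    simp only [List.mem_map, List.mem_range] at hyc
    obtain ⟨i', _, rfl⟩ := hyc
    have : (pvSl xs i' (l+1)).length ≤ l + 1 := pvSl_length_le xs i' (l+1)
    simp only [hxlen, decide_eq_false_iff_not, not_lt]
    omega
  · -- hv : elements of columns ≥ t+1 have length > t+1
    intro y hy
    simp only [List.mem_flatMap, List.mem_map, List.mem_range] at hy
    obtain ⟨l, ⟨m, hm, rfl⟩, hyc⟩ := hy
    unfold pvCol at hyc
    simp only [List.mem_map, List.mem_range] at hyc
    obtain ⟨i', hi', rfl⟩ := hyc
    have hcap : i' < min (if (t+1) + m + 1 ≤ t then i + 1 else i) (n - ((t+1)+m)) := hi'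
    have hlen : (pvSl xs i' ((t+1)+m+1)).length = (t+1)+m+1 := by
      apply pvSl_length
      omega
    simp only [hxlen, hlen, decide_eq_true_eq]
    omega

lemma pv_inner (xs : List String) (i : Nat)
    (hbase : PySem.List.sorted (pvFlatRows xs i) (fun l => l.length) false = pvQ xs i 0) :
    ∀ t, i + t ≤ xs.length →
      PySem.List.sorted (pvFlatRows xs i ++ (pvRow xs i).take t) (fun l => l.length) false
        = pvQ xs i t := by
  intro t
  induction t with
  | zero => intro _; simpa using hbase
  | succ t ih =>
    intro ht
    have ht' : i + t ≤ xs.length := by omega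
    have hrow : (pvRow xs i).take (t+1) = (pvRow xs i).take t ++ [pvSl xs i (t+1)] := by
      rw [List.take_add_one]
      congr 1
      have hlen : t < (pvRow xs i).length := by
        unfold pvRow
        simp only [List.length_map, List.length_range]
        omega
      rw [List.getElem?_eq_getElem hlen]
      unfold pvRow
      simp
    rw [hrow, ← List.append_assoc, pv_sorted_snoc, ih ht', pv_step xs i t (by omega)]

lemma pv_outer (xs : List String) :
    ∀ i, i ≤ xs.length →
      PySem.List.sorted (pvFlatRows xs i) (fun l => l.length) false = pvQ xs i 0 := by
  intro i
  induction i with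
  | zero =>
    intro _
    have h1 : pvFlatRows xs 0 = [] := by simp [pvFlatRows]
    have h2 : pvQ xs 0 0 = [] := by
      unfold pvQ pvCol
      simp
    rw [h1, h2]
    rfl
  | succ i ih =>
    intro hi
    have hi' : i ≤ xs.length := by omega
    have hflat : pvFlatRows xs (i+1) = pvFlatRows xs i ++ pvRow xs i := by
      unfold pvFlatRows
      rw [List.range_succ, List.flatMap_append]
      simp
    have htake : (pvRow xs i).take (xs.length - i) = pvRow xs i := by
      apply List.take_of_length_le
      unfold pvRow
      simp
    rw [hflat, ← htake, pv_inner xs i (ih hi') (xs.length - i) (by omega), pv_rows]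

lemma pv_sorted_eq (xs : List String) :
    PySem.List.sorted (pvFlatRows xs xs.length) (fun l => l.length) false = pvSB xs := by
  rw [pv_outer xs xs.length le_rfl]
  unfold pvQ pvSB
  apply List.flatMap_congr
  intro l _
  congr 1
  split_ifs <;> omega

lemma pv_row_eq (xs : List String) (k : Nat) :
    (PySem.List.pyRange ((k:Int) + 1) ((xs.length : Int) + 1) 1).map
      (fun j => PySem.List.slice xs (some (k:Int)) (some j)) = pvRow xs k := by
  rw [PySem.List.pyRange_one]
  have h0 : ((xs.length : Int) + 1 - ((k:Int)+1)).toNat = xs.length - k := by omega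
  rw [h0, List.map_map]
  apply List.map_congr_left
  intro t ht
  have h1 : (k:Int) + 1 + (t:Int) = ((k + 1 + t : Nat) : Int) := by push_cast; ring
  simp only [Function.comp, h1]
  rw [PySem.List.slice_natCast xs k (k+1+t)]
  unfold pvSl
  congr 1
  omega

lemma pv_portA_list (xs : List String) :
    (PySem.List.pyRange 0 (xs.length : Int) 1).foldl (fun acc i =>
      (PySem.List.pyRange (i + 1) ((xs.length : Int) + 1) 1).foldl (fun acc2 j =>
        acc2 ++ [PySem.List.slice xs (some i) (some j)]) acc) []
    = pvFlatRows xs xs.length := by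
  simp only [PySem.List.foldl_append_singleton_eq_map, PySem.List.foldl_append_eq_flatMap,
    List.nil_append]
  rw [PySem.List.pyRange_zero_nat, List.flatMap_map]
  unfold pvFlatRows
  apply List.flatMap_congr
  intro k _
  exact pv_row_eq xs k

lemma pv_portB_list (xs : List String) :
    (PySem.List.pyRange 1 ((xs.length : Int) + 1) 1).foldl (fun acc L =>
      (PySem.List.pyRange 0 ((xs.length : Int) - L + 1) 1).foldl (fun acc2 i =>
        acc2 ++ [PySem.Str.join " " (PySem.List.slice xs (some i) (some (i + L)))]) acc) []
    = (pvSB xs).map (PySem.Str.join " ") := by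
  simp only [PySem.List.foldl_append_singleton_eq_map, PySem.List.foldl_append_eq_flatMap,
    List.nil_append]
  rw [PySem.List.pyRange_one]
  have h0 : ((xs.length : Int) + 1 - 1).toNat = xs.length := by omega
  rw [h0, List.flatMap_map]
  unfold pvSB
  rw [List.map_flatMap]
  apply List.flatMap_congr
  intro l hl
  have hl' : l < xs.length := List.mem_range.mp hl
  have h1 : (xs.length : Int) - (1 + (l:Int)) + 1 = ((xs.length - l : Nat) : Int) := by omega
  rw [h1, PySem.List.pyRange_zero_nat, List.map_map]
  unfold pvCol
  rw [List.map_map]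
  apply List.map_congr_left
  intro i hi
  have h2 : (i:Int) + (1 + (l:Int)) = ((i + (l+1) : Nat) : Int) := by push_cast; ring
  simp only [Function.comp, h2]
  rw [PySem.List.slice_natCast xs i (i + (l+1))]
  unfold pvSl
  congr 2
  omega

lemma pv_mwlts (l : List (List String)) :
    multiplesWordsListToSentence l = l.map (PySem.Str.join " ") := by
  unfold multiplesWordsListToSentence wordsListToSentence
  exact PySem.List.foldl_append_singleton_eq_map _ l []

-- ===== VERDICT (by name: the statement is the Claim_ definition above) =====
theorem generateSubSentences_spec : Claim_equal_generateSubSentences := by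
  intro sentence _
  show multiplesWordsListToSentence
      (PySem.List.sorted
        ((PySem.List.pyRange 0 (sentence.length : Int) 1).foldl (fun acc i =>
          (PySem.List.pyRange (i + 1) ((sentence.length : Int) + 1) 1).foldl (fun acc2 j =>
            acc2 ++ [PySem.List.slice sentence (some i) (some j)]) acc) [])
        (fun l => l.length) false)
    = generateSubSentences_alt sentence
  have hB : generateSubSentences_alt sentence
      = (PySem.List.pyRange 1 ((sentence.length : Int) + 1) 1).foldl (fun acc L =>
          (PySem.List.pyRange 0 ((sentence.length : Int) - L + 1) 1).foldl (fun acc2 i =>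
            acc2 ++ [PySem.Str.join " " (PySem.List.slice sentence (some i) (some (i + L)))]) acc) [] := rfl
  rw [pv_portA_list, pv_mwlts, pv_sorted_eq, hB, pv_portB_list]
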